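-- pv_equiv track=rewrite | github.com/NVIDIA/OSMO | src/scripts/coverage_agent/lcov_parser.py | _compute_uncovered_ranges
-- ===== SOURCE A (Python) =====
-- def _compute_uncovered_ranges(line_hits: dict[int, int]) -> list[tuple[int, int]]:
--     uncovered_lines = sorted(line_num for line_num, hits in line_hits.items() if hits == 0)
--     if not uncovered_lines:
--         return []
--
--     ranges = []
--     start = uncovered_lines[0]
--     end = uncovered_lines[0]
--
--     for line_num in uncovered_lines[1:]:
--         if line_num == end + 1:
--             end = line_num
--         else:
--             ranges.append((start, end))
--             start = line_num
--             end = line_num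
--
--     ranges.append((start, end))
--     return ranges
-- ===== SOURCE B (Python) =====
-- def _compute_uncovered_ranges(line_hits: dict[int, int]) -> list[tuple[int, int]]:
--     # Boundary-set method: a line starts a range iff its predecessor is not
--     # uncovered, and ends one iff its successor is not uncovered; the sorted
--     # starts pair up with the sorted ends positionally.
--     zero = {line_num for line_num, hits in line_hits.items() if hits == 0}
--     starts = sorted(x for x in zero if x - 1 not in zero)
--     ends = sorted(x for x in zero if x + 1 not in zero)
--     return list(zip(starts, ends))
-- ===== Notes on version B (the rewrite author's own statement) =====
-- stated objective: alternative
-- what changed: Replaces A's single sorted linear grouping pass threading a pending (start, end) accumulator by a boundary-set algorithm: build the set of zero-hit lines, select as range starts the members whose predecessor is absent and as range ends those whose successor is absent, sort the two boundary lists and zip them positionally.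
import Mathlib
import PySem

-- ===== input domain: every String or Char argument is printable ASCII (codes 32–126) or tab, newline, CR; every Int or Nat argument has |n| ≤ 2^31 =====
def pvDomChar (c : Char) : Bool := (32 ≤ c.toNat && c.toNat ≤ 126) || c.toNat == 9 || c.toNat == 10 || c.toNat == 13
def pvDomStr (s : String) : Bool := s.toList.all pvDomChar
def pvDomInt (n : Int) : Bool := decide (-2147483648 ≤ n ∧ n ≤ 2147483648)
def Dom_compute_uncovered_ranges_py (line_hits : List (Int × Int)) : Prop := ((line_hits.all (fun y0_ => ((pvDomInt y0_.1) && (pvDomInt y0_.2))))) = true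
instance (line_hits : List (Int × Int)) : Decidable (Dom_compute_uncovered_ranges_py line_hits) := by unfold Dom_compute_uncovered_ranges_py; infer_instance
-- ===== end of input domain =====

-- B replaces A's sorted linear grouping scan (a fold threading a pending start/end range)
-- by a boundary-set algorithm: starts = uncovered lines whose predecessor is not uncovered,
-- ends = those whose successor is not uncovered, sorted and zipped; alternative, not faster.


-- ===== PORT A =====
-- literal transliteration of A: sort the zero-hit keys, then fold over the tail with
-- state (ranges, start, end), appending the pending range at each break and once after the loop.
-- the body of A's for-loop, named so the proofs can refer to it
def pvStepA (st : List (Int × Int) × Int × Int) (line_num : Int) : List (Int × Int) × Int × Int :=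
  let (ranges, start, e) := st
  if line_num = e + 1 then (ranges, start, line_num)
  else (ranges ++ [(start, e)], line_num, line_num)

def compute_uncovered_ranges_py (line_hits : List (Int × Int)) : List (Int × Int) :=
  let uncovered_lines : List Int :=
    PySem.List.sorted
      (((PySem.Dict.ofList line_hits).items.filter (fun p => p.2 == 0)).map Prod.fst)
      (fun x => x) false
  match uncovered_lines with
  | [] => []
  | first :: rest =>
    let st := rest.foldl pvStepA ([], first, first)
    st.1 ++ [(st.2.1, st.2.2)]

-- ===== PORT B =====
-- literal transliteration of Source B: the SET of zero-hit lines, then the boundary elements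
-- (predecessor absent → a start, successor absent → an end), each sorted, zipped pairwise.
def compute_uncovered_ranges_py_alt (line_hits : List (Int × Int)) : List (Int × Int) :=
  let zero : PySem.Set Int :=
    PySem.Set.ofList (((PySem.Dict.ofList line_hits).items.filter (fun p => p.2 == 0)).map Prod.fst)
  let starts :=
    PySem.List.sorted (zero.filter (fun x => !(PySem.Set.contains zero (x - 1)))) (fun x => x) false
  let ends :=
    PySem.List.sorted (zero.filter (fun x => !(PySem.Set.contains zero (x + 1)))) (fun x => x) false
  starts.zip ends

-- ===== PRECONDITION & SPEC =====
def Spec_compute_uncovered_ranges_py (line_hits : List (Int × Int)) (out : List (Int × Int)) : Prop := out = compute_uncovered_ranges_py_alt line_hits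
instance (line_hits : List (Int × Int)) (out : List (Int × Int)) : Decidable (Spec_compute_uncovered_ranges_py line_hits out) := by unfold Spec_compute_uncovered_ranges_py; infer_instance

-- ===== CLAIM (what is proved, stated in full; the proofs are below) =====
def Claim_equal_compute_uncovered_ranges_py : Prop := ∀ (line_hits : List (Int × Int)), Dom_compute_uncovered_ranges_py line_hits → Spec_compute_uncovered_ranges_py line_hits (compute_uncovered_ranges_py line_hits)

-- ===== LEMMAS AND PROOFS =====

-- reference grouping A is reduced to: scan with the current range (s, e) open
def pvGo (s e : Int) : List Int → List (Int × Int)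
  | [] => [(s, e)]
  | x :: rest => if x = e + 1 then pvGo s x rest else (s, e) :: pvGo x x rest

-- local (neighbour-based) versions of B's boundary filters on a strictly increasing list
def pvStartsAux (prev : Int) : List Int → List Int
  | [] => []
  | y :: r => if y = prev + 1 then pvStartsAux y r else y :: pvStartsAux y r

def pvEnds : List Int → List Int
  | [] => []
  | x :: r => if r.head? = some (x + 1) then pvEnds r else x :: pvEnds r

-- A's fold equals pvGo, for any accumulator and pending range
theorem foldA_eq (xs : List Int) (acc : List (Int × Int)) (s e : Int) :
    (xs.foldl pvStepA (acc, s, e)).1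
      ++ [((xs.foldl pvStepA (acc, s, e)).2.1, (xs.foldl pvStepA (acc, s, e)).2.2)]
    = acc ++ pvGo s e xs := by
  induction xs generalizing acc s e with
  | nil => simp [pvGo]
  | cons x rest ih =>
    simp only [List.foldl_cons, pvStepA, pvGo]
    by_cases hx : x = e + 1
    · rw [if_pos hx, if_pos hx]
      exact ih acc s x
    · rw [if_neg hx, if_neg hx, ih (acc ++ [(s, e)]) x x]
      simp

-- pvGo IS the zip of the local starts and ends (no sortedness needed)
theorem pvGo_zip (xs : List Int) (s e : Int) :
    pvGo s e xs = (s :: pvStartsAux e xs).zip (pvEnds (e :: xs)) := by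
  induction xs generalizing s e with
  | nil => simp [pvGo, pvStartsAux, pvEnds]
  | cons x rest ih =>
    simp only [pvGo, pvStartsAux]
    by_cases hx : x = e + 1
    · rw [if_pos hx, if_pos hx, ih]
      have h2 : pvEnds (e :: x :: rest) = pvEnds (x :: rest) := by
        simp [pvEnds, hx]
      rw [h2]
    · rw [if_neg hx, if_neg hx, ih]
      have h2 : pvEnds (e :: x :: rest) = e :: pvEnds (x :: rest) := by
        simp [pvEnds, hx]
      rw [h2]
      rfl

-- B's start filter localizes: on a strictly increasing list, x-1 is a member iff
-- x-1 is exactly the preceding element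
theorem startsFilter (rest : List Int) : ∀ (pre : List Int) (prev : Int),
    List.Pairwise (· < ·) (pre ++ prev :: rest) →
    rest.filter (fun y => !((pre ++ prev :: rest).contains (y - 1))) = pvStartsAux prev rest := by
  induction rest with
  | nil => intro pre prev _; rfl
  | cons y r ih =>
    intro pre prev hp
    have hpre : ∀ a ∈ pre, ∀ b ∈ prev :: y :: r, a < b := (List.pairwise_append.1 hp).2.2
    have htail : List.Pairwise (· < ·) (prev :: y :: r) := (List.pairwise_append.1 hp).2.1
    have hprev : ∀ b ∈ y :: r, prev < b := (List.pairwise_cons.1 htail).1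
    have hy : ∀ b ∈ r, y < b := (List.pairwise_cons.1 (List.pairwise_cons.1 htail).2).1
    have hmem : (y - 1) ∈ (pre ++ prev :: y :: r) ↔ y = prev + 1 := by
      constructor
      · intro h
        rcases List.mem_append.1 h with h | h
        · have h1 := hpre _ h prev (by simp)
          have h2 := hprev y (by simp)
          omega
        · rcases List.mem_cons.1 h with h | h
          · omega
          · rcases List.mem_cons.1 h with h | h
            · omega
            · have := hy _ h; omega
      · intro h
        have h1 : y - 1 = prev := by omega
        rw [h1]
        simp
    have hlist : pre ++ prev :: y :: r = (pre ++ [prev]) ++ y :: r := by simp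
    have hih := ih (pre ++ [prev]) y (by rw [← hlist]; exact hp)
    rw [← hlist] at hih
    rw [List.filter_cons]
    by_cases hc : y = prev + 1
    · have hct : ((pre ++ prev :: y :: r).contains (y - 1)) = true :=
        List.contains_iff_mem.2 (hmem.2 hc)
      rw [if_neg (by rw [hct]; decide)]
      rw [hih]
      simp [pvStartsAux, hc]
    · have hct : ((pre ++ prev :: y :: r).contains (y - 1)) = false := by
        rw [Bool.eq_false_iff]
        intro h
        exact hc (hmem.1 (List.contains_iff_mem.1 h))
      rw [if_pos (by rw [hct]; rfl)]
      rw [hih]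
      simp [pvStartsAux, hc]

-- B's end filter localizes: x+1 is a member iff x+1 is exactly the next element
theorem endsFilter (xs : List Int) : ∀ (pre : List Int),
    List.Pairwise (· < ·) (pre ++ xs) →
    xs.filter (fun y => !((pre ++ xs).contains (y + 1))) = pvEnds xs := by
  induction xs with
  | nil => intro pre _; rfl
  | cons x r ih =>
    intro pre hp
    have hpre : ∀ a ∈ pre, ∀ b ∈ x :: r, a < b := (List.pairwise_append.1 hp).2.2
    have htail : List.Pairwise (· < ·) (x :: r) := (List.pairwise_append.1 hp).2.1
    have hx : ∀ b ∈ r, x < b := (List.pairwise_cons.1 htail).1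
    have hr : List.Pairwise (· < ·) r := (List.pairwise_cons.1 htail).2
    have hmem : (x + 1) ∈ (pre ++ x :: r) ↔ r.head? = some (x + 1) := by
      constructor
      · intro h
        rcases List.mem_append.1 h with h | h
        · have := hpre _ h x (by simp); omega
        · rcases List.mem_cons.1 h with h | h
          · omega
          · cases r with
            | nil => simp at h
            | cons h0 t =>
              rcases List.mem_cons.1 h with h1 | h1
              · rw [← h1]; rfl
              · have h2 := hx h0 (by simp)
                have h3 := (List.pairwise_cons.1 hr).1 _ h1
                omega
      · intro h
        cases r with
        | nil => simp at h
        | cons h0 t =>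
          have h1 : h0 = x + 1 := by simpa using h
          rw [← h1]
          simp
    have hlist : pre ++ x :: r = (pre ++ [x]) ++ r := by simp
    have hih := ih (pre ++ [x]) (by rw [← hlist]; exact hp)
    rw [← hlist] at hih
    rw [List.filter_cons]
    by_cases hc : r.head? = some (x + 1)
    · have hct : ((pre ++ x :: r).contains (x + 1)) = true := List.contains_iff_mem.2 (hmem.2 hc)
      rw [if_neg (by rw [hct]; decide)]
      rw [hih]
      simp [pvEnds, hc]
    · have hct : ((pre ++ x :: r).contains (x + 1)) = false := by
        rw [Bool.eq_false_iff]
        intro h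
        exact hc (hmem.1 (List.contains_iff_mem.1 h))
      rw [if_pos (by rw [hct]; rfl)]
      rw [hih]
      simp [pvEnds, hc]

-- ===== VERDICT (by name: the statement is the Claim_ definition above) =====
theorem compute_uncovered_ranges_py_spec : Claim_equal_compute_uncovered_ranges_py := by
  intro line_hits _
  unfold Spec_compute_uncovered_ranges_py
  simp only [compute_uncovered_ranges_py, compute_uncovered_ranges_py_alt]
  set L : List Int :=
    ((PySem.Dict.ofList line_hits).items.filter (fun p => p.2 == 0)).map Prod.fst with hLdef
  -- the zero-hit keys are distinct (dict keys), so the set IS the list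
  have hnd : L.Nodup := by
    have hkeys : ((PySem.Dict.ofList line_hits).items.map (fun x => x.1)).Nodup :=
      PySem.Dict.nodup_keys_ofList line_hits
    have hsub : List.Sublist L ((PySem.Dict.ofList line_hits).items.map (fun x => x.1)) :=
      List.Sublist.map _ List.filter_sublist
    exact hkeys.sublist hsub
  have hz : PySem.Set.ofList L = L := PySem.Set.ofList_eq_self_of_nodup L hnd
  rw [hz]
  set xs := PySem.List.sorted L (fun x => x) false with hxs
  have hsorted : List.Pairwise (· < ·) xs := by
    have := PySem.List.sorted_ofList_pairwise_lt L
    rwa [hz] at this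
  have hperm : xs.Perm L := PySem.List.sorted_perm L (fun x => x) false
  -- sorting the filtered set = filtering the sorted list (same predicate, strictly increasing)
  have hstart :
      PySem.List.sorted (L.filter (fun x => !(PySem.Set.contains L (x - 1)))) (fun x => x) false
        = xs.filter (fun x => !(PySem.Set.contains L (x - 1))) :=
    PySem.List.sorted_eq_of_perm_of_pairwise_lt _ _ _
      (hperm.filter _) (List.Pairwise.sublist List.filter_sublist hsorted)
  have hend :
      PySem.List.sorted (L.filter (fun x => !(PySem.Set.contains L (x + 1)))) (fun x => x) false
        = xs.filter (fun x => !(PySem.Set.contains L (x + 1))) :=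
    PySem.List.sorted_eq_of_perm_of_pairwise_lt _ _ _
      (hperm.filter _) (List.Pairwise.sublist List.filter_sublist hsorted)
  rw [hstart, hend]
  -- B's membership tests in L are membership tests in xs (same elements)
  have hcongr : ∀ (d : Int), ∀ x : Int, PySem.Set.contains L (x + d) = xs.contains (x + d) := by
    intro d x
    show L.contains (x + d) = xs.contains (x + d)
    by_cases h : (x + d) ∈ L
    · rw [List.contains_iff_mem.2 h, List.contains_iff_mem.2 (hperm.mem_iff.2 h)]
    · have h' : (x + d) ∉ xs := fun hh => h (hperm.mem_iff.1 hh)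
      cases hL : L.contains (x + d) with
      | true => exact absurd (List.contains_iff_mem.1 hL) h
      | false =>
        cases hX : xs.contains (x + d) with
        | true => exact absurd (List.contains_iff_mem.1 hX) h'
        | false => rfl
  have hfs : xs.filter (fun x => !(PySem.Set.contains L (x - 1)))
      = xs.filter (fun x => !(xs.contains (x - 1))) := by
    apply List.filter_congr
    intro a _
    have := hcongr (-1) a
    simp only [show ∀ b : Int, b + (-1) = b - 1 by intro b; ring] at this
    rw [this]
  have hfe : xs.filter (fun x => !(PySem.Set.contains L (x + 1)))
      = xs.filter (fun x => !(xs.contains (x + 1))) := by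
    apply List.filter_congr
    intro a _
    rw [hcongr 1 a]
  rw [hfs, hfe]
  -- now both sides are about the strictly increasing list xs only
  clear_value xs
  clear hstart hend hfs hfe hcongr hperm hz hnd hLdef
  cases xs with
  | nil => rfl
  | cons f rest =>
    show (rest.foldl pvStepA ([], f, f)).1
        ++ [((rest.foldl pvStepA ([], f, f)).2.1, (rest.foldl pvStepA ([], f, f)).2.2)]
      = _
    rw [foldA_eq rest [] f f, List.nil_append, pvGo_zip]
    -- starts: f is kept (f-1 below every element), tail localizes
    have hf : ((f :: rest).contains (f - 1)) = false := by
      have hmin : ∀ b ∈ rest, f < b := (List.pairwise_cons.1 hsorted).1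
      cases hc : ((f :: rest).contains (f - 1)) with
      | false => rfl
      | true =>
        rcases List.mem_cons.1 (List.contains_iff_mem.1 hc) with h | h
        · omega
        · have := hmin _ h; omega
    have hstarts : (f :: rest).filter (fun x => !((f :: rest).contains (x - 1)))
        = f :: pvStartsAux f rest := by
      rw [List.filter_cons]
      simp only [hf, Bool.not_false]
      have := startsFilter rest [] f (by simpa using hsorted)
      simpa using this
    have hends : (f :: rest).filter (fun x => !((f :: rest).contains (x + 1)))
        = pvEnds (f :: rest) := by
      have := endsFilter (f :: rest) [] (by simpa using hsorted)
      simpa using this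
    rw [hstarts, hends]
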